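-- pv_equiv track=rewrite | github.com/plturrell/kmodels | cafa_6_protein_function_prediction/src/modeling/ensemble_cli.py | _align_entities
-- ===== SOURCE A (Python) =====
-- from typing import Dict, List, Optional, Sequence
--
-- def _align_entities(
--     prediction_payloads: Sequence[Dict[str, Dict[str, float]]],
-- ) -> tuple[List[str], List[str]]:
--     """Return sorted lists of protein IDs and GO terms common to all predictions."""
--     protein_ids = set(prediction_payloads[0].keys())
--     go_terms = set()
--     for payload in prediction_payloads:
--         protein_ids &= set(payload.keys())
--         for mapping in payload.values():
--             go_terms.update(mapping.keys())
--     if not protein_ids: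
--         raise RuntimeError("No overlapping protein IDs across provided prediction files.")
--     if not go_terms:
--         raise RuntimeError("No GO terms found in prediction files.")
--     return sorted(protein_ids), sorted(go_terms)
-- ===== SOURCE B (Python) =====
-- from typing import Dict, List, Sequence
--
-- def _align_entities(
--     prediction_payloads: Sequence[Dict[str, Dict[str, float]]],
-- ) -> tuple[List[str], List[str]]:
--     """Count payload membership per protein ID in one pass; a protein is common
--     iff its count equals the number of payloads."""
--     n = len(prediction_payloads)
--     counts: Dict[str, int] = {}
--     go_keys: List[str] = []
--     for payload in prediction_payloads:
--         for pid in payload: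
--             counts[pid] = counts.get(pid, 0) + 1
--         for mapping in payload.values():
--             go_keys.extend(mapping.keys())
--     protein_ids = [pid for pid, c in counts.items() if c == n]
--     if not protein_ids:
--         raise RuntimeError("No overlapping protein IDs across provided prediction files.")
--     go_terms = set(go_keys)
--     if not go_terms:
--         raise RuntimeError("No GO terms found in prediction files.")
--     return sorted(protein_ids), sorted(go_terms)
-- ===== Notes on version B (the rewrite author's own statement) =====
-- stated objective: idiomatic
-- what changed: Replaces A's per-payload set intersections with a single one-pass occurrence counter (a protein ID is common iff its count equals the number of payloads) and accumulates GO keys in a flat list deduplicated once at the end.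
-- outside the precondition, e.g. on _align_entities([]): A raises IndexError, B raises RuntimeError; on _align_entities([{'a': {}}, {'b': {}}]): A raises RuntimeError, B raises RuntimeError; on _align_entities([{'a': {}}]): A raises RuntimeError, B raises RuntimeError
import Mathlib
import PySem

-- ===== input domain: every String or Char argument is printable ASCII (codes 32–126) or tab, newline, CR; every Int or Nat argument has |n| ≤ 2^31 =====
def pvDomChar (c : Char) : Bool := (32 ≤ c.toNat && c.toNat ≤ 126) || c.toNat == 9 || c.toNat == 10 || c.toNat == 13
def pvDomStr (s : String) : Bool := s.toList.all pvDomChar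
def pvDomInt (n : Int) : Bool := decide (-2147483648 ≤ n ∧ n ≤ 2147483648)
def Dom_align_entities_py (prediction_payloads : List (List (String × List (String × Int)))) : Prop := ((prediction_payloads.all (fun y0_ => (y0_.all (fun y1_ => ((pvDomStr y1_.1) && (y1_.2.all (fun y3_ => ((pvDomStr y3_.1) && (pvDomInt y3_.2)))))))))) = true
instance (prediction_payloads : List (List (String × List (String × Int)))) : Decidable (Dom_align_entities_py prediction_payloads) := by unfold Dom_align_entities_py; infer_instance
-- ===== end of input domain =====

-- B replaces A's repeated set intersections by a single occurrence counter: a protein ID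
-- is common to all payloads iff its count equals the number of payloads (objective: idiomatic).

-- ===== PORT A =====
-- Literal port of _align_entities: dicts are association lists, payload.keys() = map Prod.fst,
-- payload.values() = map Prod.snd; the fold carries (protein_ids, go_terms) as Python sets.
def align_entities_py (prediction_payloads : List (List (String × List (String × Int)))) : List String × List String :=
  match prediction_payloads with
  | [] => ([], [])  -- prediction_payloads[0] raises IndexError here (excluded by Pre_)
  | p0 :: rest =>
    let st := (p0 :: rest).foldl
      (fun (st : PySem.Set String × PySem.Set String) payload =>
        (PySem.Set.inter st.1 (PySem.Set.ofList (payload.map Prod.fst)),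
         (payload.map Prod.snd).foldl
           (fun g m => PySem.Set.update g (m.map Prod.fst)) st.2))
      (PySem.Set.ofList (p0.map Prod.fst), PySem.Set.empty)
    if st.1.isEmpty then ([], [])       -- raise RuntimeError "No overlapping protein IDs …" (excluded by Pre_)
    else if st.2.isEmpty then ([], [])  -- raise RuntimeError "No GO terms …" (excluded by Pre_)
    else (PySem.List.sorted st.1 (fun x => x) false, PySem.List.sorted st.2 (fun x => x) false)

-- ===== PORT B =====
-- Literal port of Source B: one pass building a count dict and a flat list of GO keys,
-- then filter counts.items() by c == n and dedup the GO keys into a set.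
def align_entities_py_alt (prediction_payloads : List (List (String × List (String × Int)))) : List String × List String :=
  let n := prediction_payloads.length
  let st := prediction_payloads.foldl
    (fun (st : PySem.Dict String Int × List String) payload =>
      ((payload.map Prod.fst).foldl (fun d pid => d.insert pid (d.getD pid 0 + 1)) st.1,
       (payload.map Prod.snd).foldl (fun gk m => gk ++ m.map Prod.fst) st.2))
    (PySem.Dict.empty, [])
  let protein_ids := (st.1.items.filter (fun pc => pc.2 == (n : Int))).map Prod.fst
  if protein_ids.isEmpty then ([], [])  -- raise RuntimeError "No overlapping protein IDs …" (excluded by Pre_)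
  else
    let go_terms := PySem.Set.ofList st.2
    if go_terms.isEmpty then ([], [])   -- raise RuntimeError "No GO terms …" (excluded by Pre_)
    else (PySem.List.sorted protein_ids (fun x => x) false,
          PySem.List.sorted go_terms (fun x => x) false)

-- ===== PRECONDITION & SPEC =====
-- Pre_ excludes exactly the inputs on which the Python A raises (empty input → IndexError;
-- no common protein ID or no GO term → RuntimeError), and requires each payload's keys to be
-- distinct — the representation invariant of the Python dicts these lists stand for.
def Pre_align_entities_py (prediction_payloads : List (List (String × List (String × Int)))) : Prop :=
  prediction_payloads ≠ [] ∧
  (∀ p ∈ prediction_payloads, (p.map Prod.fst).Nodup) ∧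
  (∃ pid ∈ (prediction_payloads.headD []).map Prod.fst,
     ∀ p ∈ prediction_payloads, pid ∈ p.map Prod.fst) ∧
  (∃ p ∈ prediction_payloads, ∃ kv ∈ p, kv.2 ≠ [])
instance (prediction_payloads : List (List (String × List (String × Int)))) : Decidable (Pre_align_entities_py prediction_payloads) := by unfold Pre_align_entities_py; infer_instance

def pvWitness_align_entities_py : (List (List (String × List (String × Int)))) :=
  [[("P1", [("GO:1", 1)]), ("P2", [])], [("P1", [("GO:2", 2)])]]

def Spec_align_entities_py (prediction_payloads : List (List (String × List (String × Int)))) (out : List String × List String) : Prop := out = align_entities_py_alt prediction_payloads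
instance (prediction_payloads : List (List (String × List (String × Int)))) (out : List String × List String) : Decidable (Spec_align_entities_py prediction_payloads out) := by unfold Spec_align_entities_py; infer_instance

-- ===== CLAIM (what is proved, stated in full; the proofs are below) =====
def Claim_equal_align_entities_py : Prop := ∀ (prediction_payloads : List (List (String × List (String × Int)))), Dom_align_entities_py prediction_payloads → Pre_align_entities_py prediction_payloads → Spec_align_entities_py prediction_payloads (align_entities_py prediction_payloads)

-- ===== LEMMAS AND PROOFS =====

-- keys of one payload / all GO-term keys of all payloads, in traversal order
def pvKeys (p : List (String × List (String × Int))) : List String := p.map Prod.fst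
def pvGoAll (pps : List (List (String × List (String × Int)))) : List String :=
  pps.flatMap (fun p => (p.map Prod.snd).flatMap (fun m => m.map Prod.fst))
def pvFlatKeys (pps : List (List (String × List (String × Int)))) : List String :=
  pps.flatMap pvKeys

-- A's paired fold splits into its two independent components
theorem pvFoldA_split (pps : List (List (String × List (String × Int))))
    (S G : PySem.Set String) :
    pps.foldl
      (fun (st : PySem.Set String × PySem.Set String) payload =>
        (PySem.Set.inter st.1 (PySem.Set.ofList (payload.map Prod.fst)),
         (payload.map Prod.snd).foldl
           (fun g m => PySem.Set.update g (m.map Prod.fst)) st.2)) (S, G)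
    = (pps.foldl (fun s payload => PySem.Set.inter s (PySem.Set.ofList (pvKeys payload))) S,
       pps.foldl (fun g payload => (payload.map Prod.snd).foldl
           (fun g m => PySem.Set.update g (m.map Prod.fst)) g) G) := by
  induction pps generalizing S G with
  | nil => rfl
  | cons p t ih => simp only [List.foldl_cons]; exact ih _ _

-- B's paired fold splits likewise
theorem pvFoldB_split (pps : List (List (String × List (String × Int))))
    (D : PySem.Dict String Int) (K : List String) :
    pps.foldl
      (fun (st : PySem.Dict String Int × List String) payload =>
        ((payload.map Prod.fst).foldl (fun d pid => d.insert pid (d.getD pid 0 + 1)) st.1,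
         (payload.map Prod.snd).foldl (fun gk m => gk ++ m.map Prod.fst) st.2)) (D, K)
    = (pps.foldl (fun d payload => (pvKeys payload).foldl
          (fun d pid => d.insert pid (d.getD pid 0 + 1)) d) D,
       pps.foldl (fun gk payload => (payload.map Prod.snd).foldl
          (fun gk m => gk ++ m.map Prod.fst) gk) K) := by
  induction pps generalizing D K with
  | nil => rfl
  | cons p t ih => simp only [List.foldl_cons]; exact ih _ _

-- membership in A's intersection fold
theorem pvMem_foldInter (pps : List (List (String × List (String × Int))))
    (S : PySem.Set String) (x : String) :
    x ∈ pps.foldl (fun s payload => PySem.Set.inter s (PySem.Set.ofList (pvKeys payload))) S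
    ↔ x ∈ S ∧ ∀ p ∈ pps, x ∈ pvKeys p := by
  induction pps generalizing S with
  | nil => simp
  | cons p t ih =>
    simp only [List.foldl_cons, ih, PySem.Set.mem_inter, PySem.Set.mem_ofList, List.mem_cons]
    constructor
    · rintro ⟨⟨h1, h2⟩, h3⟩
      exact ⟨h1, fun q hq => hq.elim (fun e => e ▸ h2) (h3 q)⟩
    · rintro ⟨h1, h2⟩
      exact ⟨⟨h1, h2 p (Or.inl rfl)⟩, fun q hq => h2 q (Or.inr hq)⟩

theorem pvNodup_foldInter (pps : List (List (String × List (String × Int))))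
    (S : PySem.Set String) (hS : S.Nodup) :
    (pps.foldl (fun s payload => PySem.Set.inter s (PySem.Set.ofList (pvKeys payload))) S).Nodup := by
  induction pps generalizing S with
  | nil => exact hS
  | cons p t ih => exact ih _ (PySem.Set.nodup_inter _ _ hS)

-- A's go-term fold is Set.ofList of the flat key list
theorem pvGoA_eq (pps : List (List (String × List (String × Int)))) (G : PySem.Set String) :
    pps.foldl (fun g payload => (payload.map Prod.snd).foldl
        (fun g m => PySem.Set.update g (m.map Prod.fst)) g) G
    = PySem.Set.update G (pvGoAll pps) := by
  induction pps generalizing G with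
  | nil => simp [pvGoAll]
  | cons p t ih =>
    have inner : ∀ (ms : List (List (String × Int))) (g : PySem.Set String),
        ms.foldl (fun g m => PySem.Set.update g (m.map Prod.fst)) g
        = PySem.Set.update g (ms.flatMap (fun m => m.map Prod.fst)) := by
      intro ms
      induction ms with
      | nil => intro g; simp
      | cons m mt ihm =>
        intro g
        simp only [List.foldl_cons, ihm, List.flatMap_cons, PySem.Set.update_append]
    simp only [List.foldl_cons]
    rw [inner, ih]
    simp only [pvGoAll, List.flatMap_cons, PySem.Set.update_append]

-- B's go-key fold is the flat key list
theorem pvGoB_eq (pps : List (List (String × List (String × Int)))) (K : List String) :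
    pps.foldl (fun gk payload => (payload.map Prod.snd).foldl
        (fun gk m => gk ++ m.map Prod.fst) gk) K
    = K ++ pvGoAll pps := by
  induction pps generalizing K with
  | nil => simp [pvGoAll]
  | cons p t ih =>
    simp only [List.foldl_cons, PySem.List.foldl_append_eq_flatMap, pvGoAll,
      List.flatMap_cons, List.append_assoc]

-- B's count dict is Counter(flat key list)
theorem pvCounts_eq (pps : List (List (String × List (String × Int)))) :
    pps.foldl (fun d payload => (pvKeys payload).foldl
        (fun d pid => d.insert pid (d.getD pid 0 + 1)) d) PySem.Dict.empty
    = PySem.Dict.counter (pvFlatKeys pps) := by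
  rw [← PySem.Dict.foldl_insert_getD_add_one_eq_counter, pvFlatKeys, List.foldl_flatMap]

-- count over the flat key list, when each payload's keys are distinct
theorem pvCount_le (pps : List (List (String × List (String × Int)))) (x : String)
    (h : ∀ p ∈ pps, (pvKeys p).Nodup) :
    (pvFlatKeys pps).count x ≤ pps.length := by
  induction pps with
  | nil => simp [pvFlatKeys]
  | cons p t ih =>
    have h1 : (pvKeys p).count x ≤ 1 :=
      List.nodup_iff_count_le_one.mp (h p (by simp)) x
    have h2 := ih (fun q hq => h q (by simp [hq]))
    simp only [pvFlatKeys, List.flatMap_cons, List.count_append, List.length_cons] at *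
    omega

theorem pvCount_eq_iff (pps : List (List (String × List (String × Int)))) (x : String)
    (h : ∀ p ∈ pps, (pvKeys p).Nodup) :
    (pvFlatKeys pps).count x = pps.length ↔ ∀ p ∈ pps, x ∈ pvKeys p := by
  induction pps with
  | nil => simp [pvFlatKeys]
  | cons p t ih =>
    have hp := h p (by simp)
    have h1 : (pvKeys p).count x ≤ 1 := List.nodup_iff_count_le_one.mp hp x
    have h2 := pvCount_le t x (fun q hq => h q (by simp [hq]))
    have ih' := ih (fun q hq => h q (by simp [hq]))
    have hmem : x ∈ pvKeys p ↔ (pvKeys p).count x = 1 := by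
      constructor
      · intro hm
        have := List.count_pos_iff.mpr hm
        omega
      · intro hc
        exact List.count_pos_iff.mp (by omega)
    simp only [pvFlatKeys, List.flatMap_cons, List.count_append, List.length_cons] at *
    constructor
    · intro heq
      have hc1 : (pvKeys p).count x = 1 := by omega
      have hc2 : List.count x (t.flatMap pvKeys) = t.length := by omega
      intro q hq
      rcases List.mem_cons.mp hq with e | hq'
      · exact e ▸ hmem.mpr hc1
      · exact ih'.mp hc2 q hq'
    · intro hall
      have hc1 : (pvKeys p).count x = 1 := hmem.mp (hall p (by simp))
      have hc2 : List.count x (t.flatMap pvKeys) = t.length :=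
        ih'.mpr (fun q hq => hall q (by simp [hq]))
      omega

-- two Nodup lists with the same members have the same sorted order
theorem pvSorted_eq_of_mem (xs ys : List String) (hx : xs.Nodup) (hy : ys.Nodup)
    (hmem : ∀ a, a ∈ xs ↔ a ∈ ys) :
    PySem.List.sorted xs (fun x => x) false = PySem.List.sorted ys (fun x => x) false := by
  have hperm : (PySem.List.sorted ys (fun x => x) false).Perm xs := by
    refine ((PySem.List.sorted_perm ys (fun x => x) false).trans ?_)
    exact (List.perm_ext_iff_of_nodup hy hx).mpr (fun a => (hmem a).symm)
  have hnd : (PySem.List.sorted ys (fun x => x) false).Nodup :=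
    ((PySem.List.sorted_perm ys (fun x => x) false).nodup_iff).mpr hy
  have hle := PySem.List.sorted_pairwise ys (fun x => x)
  have hlt : (PySem.List.sorted ys (fun x => x) false).Pairwise (fun a b => a < b) := by
    have := List.Pairwise.and hle hnd
    exact this.imp (fun h => lt_of_le_of_ne h.1 h.2)
  exact PySem.List.sorted_eq_of_perm_of_pairwise_lt xs _ _ hperm hlt

-- B's protein-id list characterised
theorem pvProteinB_eq (pps : List (List (String × List (String × Int)))) :
    ((PySem.Dict.counter (pvFlatKeys pps)).items.filter
        (fun pc => pc.2 == (pps.length : Int))).map Prod.fst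
    = (PySem.Set.ofList (pvFlatKeys pps)).filter
        (fun k => (pvFlatKeys pps).count k == pps.length) := by
  rw [PySem.Dict.items_counter, List.filter_map, List.map_map]
  have : ∀ k : String,
      ((fun pc : String × Int => pc.2 == (pps.length : Int)) ∘
        (fun k => (k, ((pvFlatKeys pps).count k : Int)))) k
      = ((pvFlatKeys pps).count k == pps.length) := by
    intro k
    simp [Function.comp]
  rw [List.filter_congr (fun k _ => this k)]
  rw [show (Prod.fst ∘ fun k : String => (k, ((pvFlatKeys pps).count k : Int))) = id from rfl,
    List.map_id]

-- ===== VERDICT (by name: the statement is the Claim_ definition above) =====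
theorem align_entities_py_spec : Claim_equal_align_entities_py := by
  intro pps _hdom hpre
  obtain ⟨hne, hnd, ⟨pid, hpid0, hpidall⟩, ⟨p, hp, kv, hkv, hv⟩⟩ := hpre
  unfold Spec_align_entities_py
  cases pps with
  | nil => exact absurd rfl hne
  | cons p0 rest =>
    unfold align_entities_py align_entities_py_alt
    simp only [pvFoldA_split, pvFoldB_split, pvCounts_eq, pvGoA_eq, pvGoB_eq,
      PySem.Set.update_empty, List.nil_append, pvProteinB_eq]
    -- the two protein-id lists
    set SA := (p0 :: rest).foldl
      (fun s payload => PySem.Set.inter s (PySem.Set.ofList (pvKeys payload)))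
      (PySem.Set.ofList (List.map Prod.fst p0)) with hSA
    set PB := (PySem.Set.ofList (pvFlatKeys (p0 :: rest))).filter
      (fun k => (pvFlatKeys (p0 :: rest)).count k == (p0 :: rest).length) with hPB
    have hmem : ∀ x, x ∈ SA ↔ x ∈ PB := by
      intro x
      rw [hSA, hPB, pvMem_foldInter, List.mem_filter]
      simp only [PySem.Set.mem_ofList]
      constructor
      · rintro ⟨-, hall⟩
        refine ⟨?_, ?_⟩
        · exact List.mem_flatMap.mpr ⟨p0, by simp, hall p0 (by simp)⟩
        · exact beq_iff_eq.mpr ((pvCount_eq_iff _ x (fun q hq => hnd q hq)).mpr hall)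
      · rintro ⟨-, hcnt⟩
        have hall := (pvCount_eq_iff _ x (fun q hq => hnd q hq)).mp (beq_iff_eq.mp hcnt)
        exact ⟨hall p0 (by simp), hall⟩
    have hndA : SA.Nodup := pvNodup_foldInter _ _ (PySem.Set.nodup_ofList _)
    have hndB : PB.Nodup := (PySem.Set.nodup_ofList _).filter _
    have hpidA : pid ∈ SA := by
      rw [hSA, pvMem_foldInter]
      refine ⟨?_, by simpa [pvKeys] using hpidall⟩
      exact (PySem.Set.mem_ofList _ _).mpr (by simpa using hpid0)
    have hA : SA.isEmpty = false := by
      rcases SA with _ | _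
      · exact absurd hpidA (by simp)
      · rfl
    have hB : PB.isEmpty = false := by
      rcases hPB' : PB with _ | _
      · exact absurd ((hmem pid).mp hpidA) (by simp [hPB'])
      · rfl
    have hg : ∃ g, g ∈ pvGoAll (p0 :: rest) := by
      rcases hv' : kv.2 with _ | ⟨gv, gt⟩
      · exact absurd hv' hv
      · exact ⟨gv.1, List.mem_flatMap.mpr ⟨p, hp,
          List.mem_flatMap.mpr ⟨kv.2, List.mem_map.mpr ⟨kv, hkv, rfl⟩,
            by rw [hv']; exact List.mem_map.mpr ⟨gv, by simp, rfl⟩⟩⟩⟩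
    have hG : (PySem.Set.ofList (pvGoAll (p0 :: rest))).isEmpty = false := by
      obtain ⟨g, hgmem⟩ := hg
      have : g ∈ PySem.Set.ofList (pvGoAll (p0 :: rest)) :=
        (PySem.Set.mem_ofList _ _).mpr hgmem
      rcases h' : PySem.Set.ofList (pvGoAll (p0 :: rest)) with _ | _
      · exact absurd this (by simp [h'])
      · rfl
    simp only [hA, hB, hG, Bool.false_eq_true, if_false]
    exact Prod.ext (pvSorted_eq_of_mem _ _ hndA hndB hmem) rfl
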